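-- pv_equiv track=rewrite | github.com/OOgway2499/stock_assistant | tools/news.py | filter_relevant
-- ===== SOURCE A (Python) =====
-- def filter_relevant(articles: list, query: str, max_items: int = 5) -> list:
--     """
--     Filters articles by relevance to query.
--     Returns query-relevant articles first,
--     then general articles to fill up to max_items.
--     """
--     if not query or not articles:
--         return articles[:max_items]
--
--     query_words = query.lower().split()
--     relevant    = []
--     general     = []
--
--     for article in articles:
--         title   = article.get("title", "").lower()
--         summary = article.get("summary", "").lower()
--
--         # Check if any query word appears
--         is_relevant = any(
--             word in title or word in summary
--             for word in query_words
--             if len(word) > 2  # Skip short words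
--         )
--
--         if is_relevant:
--             relevant.append(article)
--         else:
--             general.append(article)
--
--     # Combine: relevant first, then general
--     combined = relevant + general
--     return combined[:max_items]
-- ===== SOURCE B (Python) =====
-- def filter_relevant(articles: list, query: str, max_items: int = 5) -> list:
--     """Relevant-first reordering via a single stable sort on a 0/1 key."""
--     if not query or not articles:
--         return articles[:max_items]
--
--     words = [w for w in query.lower().split() if len(w) > 2]
--
--     def is_relevant(article):
--         title = article.get("title", "").lower()
--         summary = article.get("summary", "").lower()
--         return any(w in title or w in summary for w in words)
--
--     return sorted(articles, key=lambda a: 0 if is_relevant(a) else 1)[:max_items]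
-- ===== Notes on version B (the rewrite author's own statement) =====
-- stated objective: idiomatic
-- what changed: Replaces the two accumulator lists and their concatenation with one stable sort on a 0/1 relevance key (pre-filtering the short query words once), relying on sort stability to keep each group's original order.
import Mathlib
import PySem

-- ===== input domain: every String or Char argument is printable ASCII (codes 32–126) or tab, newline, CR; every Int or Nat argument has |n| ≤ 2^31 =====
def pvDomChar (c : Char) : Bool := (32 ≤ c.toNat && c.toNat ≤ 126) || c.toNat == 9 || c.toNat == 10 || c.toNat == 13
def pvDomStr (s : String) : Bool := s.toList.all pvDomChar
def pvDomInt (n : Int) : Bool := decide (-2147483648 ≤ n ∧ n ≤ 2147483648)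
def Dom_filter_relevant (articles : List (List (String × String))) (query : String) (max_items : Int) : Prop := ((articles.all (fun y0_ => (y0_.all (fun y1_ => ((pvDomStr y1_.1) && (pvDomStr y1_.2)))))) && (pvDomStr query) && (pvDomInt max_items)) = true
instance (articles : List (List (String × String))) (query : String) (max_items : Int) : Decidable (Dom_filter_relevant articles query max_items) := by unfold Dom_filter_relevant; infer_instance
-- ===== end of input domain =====

-- B replaces A's two accumulator lists with one stable sort on a 0/1 relevance key (same result, idiomatic).


-- ===== PORT A =====
def filter_relevant (articles : List (List (String × String))) (query : String) (max_items : Int) : List (List (String × String)) :=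
  if query = "" ∨ articles = [] then
    PySem.List.slice articles none (some max_items)
  else
    let query_words := PySem.Str.split₀ (PySem.Str.lower query)
    let p := articles.foldl
      (fun (acc : List (List (String × String)) × List (List (String × String))) article =>
        let title := PySem.Str.lower (PySem.Dict.getD ⟨article⟩ "title" "")
        let summary := PySem.Str.lower (PySem.Dict.getD ⟨article⟩ "summary" "")
        let is_relevant := query_words.any
          (fun word => decide (2 < PySem.Str.len word) &&
            (PySem.Str.isIn word title || PySem.Str.isIn word summary))
        if is_relevant then (acc.1 ++ [article], acc.2) else (acc.1, acc.2 ++ [article]))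
      ([], [])
    PySem.List.slice (p.1 ++ p.2) none (some max_items)

-- ===== PORT B =====
-- helper of Source B: is_relevant over the pre-filtered word list
def pvIsRelevant (words : List String) (article : List (String × String)) : Bool :=
  let title := PySem.Str.lower (PySem.Dict.getD ⟨article⟩ "title" "")
  let summary := PySem.Str.lower (PySem.Dict.getD ⟨article⟩ "summary" "")
  words.any (fun w => PySem.Str.isIn w title || PySem.Str.isIn w summary)

def filter_relevant_alt (articles : List (List (String × String))) (query : String) (max_items : Int) : List (List (String × String)) :=
  if query = "" ∨ articles = [] then
    PySem.List.slice articles none (some max_items)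
  else
    let words := (PySem.Str.split₀ (PySem.Str.lower query)).filter
      (fun w => decide (2 < PySem.Str.len w))
    PySem.List.slice
      (PySem.List.sorted articles (fun a => if pvIsRelevant words a then (0 : Int) else 1))
      none (some max_items)

-- ===== PRECONDITION & SPEC =====
def Spec_filter_relevant (articles : List (List (String × String))) (query : String) (max_items : Int) (out : List (List (String × String))) : Prop := out = filter_relevant_alt articles query max_items
instance (articles : List (List (String × String))) (query : String) (max_items : Int) (out : List (List (String × String))) : Decidable (Spec_filter_relevant articles query max_items out) := by unfold Spec_filter_relevant; infer_instance

-- ===== CLAIM (what is proved, stated in full; the proofs are below) =====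
def Claim_equal_filter_relevant : Prop := ∀ (articles : List (List (String × String))) (query : String) (max_items : Int), Dom_filter_relevant articles query max_items → Spec_filter_relevant articles query max_items (filter_relevant articles query max_items)

-- ===== LEMMAS AND PROOFS =====

-- insertBy skips a prefix it is not "before" and lands in front of a suffix it is "before"
lemma insertBy_append {α : Type} (before : α → α → Bool) (x : α) (r g : List α)
    (hr : ∀ y ∈ r, before x y = false) (hg : ∀ z ∈ g, before x z = true) :
    PySem.List.insertBy before x (r ++ g) = r ++ x :: g := by
  induction r with
  | nil =>
    cases g with
    | nil => simp [PySem.List.insertBy]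
    | cons z zs => simp [PySem.List.insertBy, hg z (by simp)]
  | cons y ys ih =>
    have h := hr y (by simp)
    simp [PySem.List.insertBy, h, ih (fun y hy => hr y (by simp [hy]))]

-- the insertion-sort foldl with a 0/1-valued key is A's two-accumulator partition foldl
lemma sorted_foldl_partition {α : Type} (rel : α → Bool) :
    ∀ (xs r g : List α), (∀ y ∈ r, rel y = true) → (∀ z ∈ g, rel z = false) →
    xs.foldl (fun acc x => PySem.List.insertBy
        (fun a b => decide ((if rel a then (0 : Int) else 1) < (if rel b then (0 : Int) else 1)))
        x acc) (r ++ g)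
      = (xs.foldl (fun acc x => if rel x then (acc.1 ++ [x], acc.2) else (acc.1, acc.2 ++ [x]))
          (r, g)).1
        ++ (xs.foldl (fun acc x => if rel x then (acc.1 ++ [x], acc.2) else (acc.1, acc.2 ++ [x]))
          (r, g)).2 := by
  intro xs
  induction xs with
  | nil => intro r g _ _; simp
  | cons x xs ih =>
    intro r g hr hg
    by_cases hx : rel x = true
    · have : PySem.List.insertBy
          (fun a b => decide ((if rel a then (0 : Int) else 1) < (if rel b then (0 : Int) else 1)))
          x (r ++ g) = (r ++ [x]) ++ g := by
        rw [insertBy_append]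
        · simp
        · intro y hy; simp [hx, hr y hy]
        · intro z hz; simp [hx, hg z hz]
      simp only [List.foldl_cons, hx, this]
      exact ih (r ++ [x]) g
        (by intro y hy; rcases List.mem_append.mp hy with h | h
            · exact hr y h
            · simp at h; simpa [h] using hx) hg
    · have hx' : rel x = false := by simpa using hx
      have : PySem.List.insertBy
          (fun a b => decide ((if rel a then (0 : Int) else 1) < (if rel b then (0 : Int) else 1)))
          x (r ++ g) = r ++ (g ++ [x]) := by
        rw [PySem.List.insertBy_of_forall_not_before, List.append_assoc]
        intro y hy
        rcases List.mem_append.mp hy with h | h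
        · simp [hx', hr y h]
        · simp [hx', hg y h]
      simp only [List.foldl_cons, hx', Bool.false_eq_true, if_false, this]
      exact ih r (g ++ [x]) hr
        (by intro z hz; rcases List.mem_append.mp hz with h | h
            · exact hg z h
            · simp at h; simpa [h] using hx')

-- the inline relevance test of A equals B's test over the pre-filtered word list
lemma rel_eq (ws : List String) (article : List (String × String)) :
    ws.any (fun word => decide (2 < PySem.Str.len word) &&
        (PySem.Str.isIn word (PySem.Str.lower (PySem.Dict.getD ⟨article⟩ "title" "")) ||
         PySem.Str.isIn word (PySem.Str.lower (PySem.Dict.getD ⟨article⟩ "summary" ""))))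
      = pvIsRelevant (ws.filter (fun w => decide (2 < PySem.Str.len w))) article := by
  unfold pvIsRelevant
  rw [List.any_filter]

-- ===== VERDICT (by name: the statement is the Claim_ definition above) =====
theorem filter_relevant_spec : Claim_equal_filter_relevant := by
  intro articles query max_items _
  unfold Spec_filter_relevant filter_relevant filter_relevant_alt
  by_cases hq : query = "" ∨ articles = []
  · simp [hq]
  · simp only [hq, if_false]
    set ws := PySem.Str.split₀ (PySem.Str.lower query) with hws
    set rel := pvIsRelevant (ws.filter (fun w => decide (2 < PySem.Str.len w))) with hrel
    have hstep : (fun (acc : List (List (String × String)) × List (List (String × String))) article =>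
        let title := PySem.Str.lower (PySem.Dict.getD ⟨article⟩ "title" "")
        let summary := PySem.Str.lower (PySem.Dict.getD ⟨article⟩ "summary" "")
        let is_relevant := ws.any
          (fun word => decide (2 < PySem.Str.len word) &&
            (PySem.Str.isIn word title || PySem.Str.isIn word summary))
        if is_relevant then (acc.1 ++ [article], acc.2) else (acc.1, acc.2 ++ [article]))
        = (fun (acc : List (List (String × String)) × List (List (String × String))) article =>
            if rel article then (acc.1 ++ [article], acc.2) else (acc.1, acc.2 ++ [article])) := by
      funext acc article
      simp only [hrel, rel_eq ws article]
    rw [hstep, PySem.List.sorted_eq_foldl_insertBy]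
    have h := sorted_foldl_partition rel articles [] [] (by simp) (by simp)
    simp only [List.nil_append] at h
    rw [h]
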